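-- pv_equiv track=rewrite | github.com/qontinui/qontinui | src/qontinui/discovery/state_construction/element_identifier.py | _cluster_parallel_lines
-- ===== SOURCE A (Python) =====
-- def _cluster_parallel_lines(
--     lines: list[tuple], tolerance: int = 10
-- ) -> list[list[tuple]]:
--     """Cluster parallel lines that are close together.
--
--     Args:
--         lines: List of line coordinates
--         tolerance: Distance tolerance for clustering
--
--     Returns:
--         List of line clusters
--     """
--     if not lines:
--         return []
--
--     # Sort lines by position
--     sorted_lines = sorted(lines)
--     clusters = [[sorted_lines[0]]]
--
--     for line in sorted_lines[1:]:
--         # Check if close to last cluster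
--         if abs(line[0] - clusters[-1][-1][0]) <= tolerance:
--             clusters[-1].append(line)
--         else:
--             clusters.append([line])
--
--     # Filter clusters with at least 2 lines
--     return [cluster for cluster in clusters if len(cluster) >= 2]
-- ===== SOURCE B (Python) =====
-- def _cluster_parallel_lines(
--     lines: list[tuple], tolerance: int = 10
-- ) -> list[list[tuple]]:
--     srt = sorted(lines)
--     # pass 1: assign each line a cluster label (prefix count of gaps > tolerance)
--     labels = []
--     lab = 0
--     prev = None
--     for line in srt:
--         if prev is not None and abs(line[0] - prev[0]) > tolerance:
--             lab += 1
--         labels.append(lab)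
--         prev = line
--     # pass 2: bucket lines into a dict keyed by label (insertion order = label order)
--     buckets = {}
--     for lab, line in zip(labels, srt):
--         buckets[lab] = buckets.get(lab, []) + [line]
--     return [c for c in buckets.values() if len(c) >= 2]
-- ===== Notes on version B (the rewrite author's own statement) =====
-- stated objective: alternative
-- what changed: B replaces A's incremental append-to-last-cluster list-of-lists accumulator by a labelling scheme: a first pass assigns every sorted line an integer cluster label (the prefix count of over-tolerance gaps), a second pass buckets lines into a dict keyed by label, and the result is the dict's values of length >= 2.
import Mathlib
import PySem

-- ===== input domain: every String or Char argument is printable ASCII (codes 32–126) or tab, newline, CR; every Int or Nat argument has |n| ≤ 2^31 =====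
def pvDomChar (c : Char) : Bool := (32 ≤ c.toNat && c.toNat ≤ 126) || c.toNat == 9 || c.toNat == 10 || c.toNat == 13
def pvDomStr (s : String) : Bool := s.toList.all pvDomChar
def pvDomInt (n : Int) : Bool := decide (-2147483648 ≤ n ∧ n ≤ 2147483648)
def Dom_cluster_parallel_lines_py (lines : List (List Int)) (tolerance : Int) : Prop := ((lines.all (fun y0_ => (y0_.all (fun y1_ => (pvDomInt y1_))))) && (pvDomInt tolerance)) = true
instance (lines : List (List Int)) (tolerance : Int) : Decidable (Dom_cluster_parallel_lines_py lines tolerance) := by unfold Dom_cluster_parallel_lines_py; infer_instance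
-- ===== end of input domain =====

-- B replaces A's append-to-last-cluster accumulator + >=2 filter by a labelling scheme: a first
-- pass assigns each sorted line an integer cluster label (prefix count of over-tolerance gaps),
-- a second pass buckets lines into a dict keyed by label, and the dict's values are filtered.
-- Alternative decomposition, same cost; equivalence is about return values (no mutation).

-- ===== PORT A =====
-- line[0] (Pre_ guarantees the line is nonempty, so pyGet? is some; getD is never taken)
def pvFirst (line : List Int) : Int := (PySem.List.pyGet? line 0).getD 0

-- one iteration of A's `for line in sorted_lines[1:]`; clusters are kept reversed with each
-- cluster reversed (Python's append-at-the-end becomes cons), so clusters[-1][-1] is the head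
-- of the head; every cluster A builds is nonempty, the `[] :: _` case is unreachable.
def pvStepA (tolerance : Int) (revClusters : List (List (List Int))) (line : List Int) :
    List (List (List Int)) :=
  match revClusters with
  | (l :: c) :: rest =>
      if |pvFirst line - pvFirst l| ≤ tolerance then (line :: l :: c) :: rest
      else [line] :: (l :: c) :: rest
  | _ => [line] :: revClusters

def cluster_parallel_lines_py (lines : List (List Int)) (tolerance : Int) :
    List (List (List Int)) :=
  if lines = [] then []
  else
    let sorted_lines := PySem.List.sorted lines (fun x => x) false
    let clusters := (sorted_lines.drop 1).foldl (pvStepA tolerance)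
        [[sorted_lines.headI]]   -- clusters = [[sorted_lines[0]]] (headI: sorted_lines ≠ [])
    ((clusters.map List.reverse).reverse).filter (fun cluster => 2 ≤ cluster.length)

-- ===== PORT B =====
-- one iteration of B's labelling loop; state = (labels, lab, prev)
def pvLabStep (tolerance : Int) (st : List Int × Int × Option (List Int)) (line : List Int) :
    List Int × Int × Option (List Int) :=
  let lab := match st.2.2 with
    | some prev => if tolerance < |pvFirst line - pvFirst prev| then st.2.1 + 1 else st.2.1
    | none => st.2.1
  (st.1 ++ [lab], lab, some line)

def cluster_parallel_lines_py_alt (lines : List (List Int)) (tolerance : Int) :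
    List (List (List Int)) :=
  let srt := PySem.List.sorted lines (fun x => x) false
  let labels := (srt.foldl (pvLabStep tolerance) ([], 0, none)).1
  -- buckets[lab] = buckets.get(lab, []) + [line]
  let buckets := (labels.zip srt).foldl
      (fun d p => d.modify p.1 [] (fun x => x ++ [p.2])) PySem.Dict.empty
  buckets.values.filter (fun c => 2 ≤ c.length)

-- ===== PRECONDITION & SPEC =====
-- Pre_ excludes exactly the inputs on which Python A raises IndexError: an empty tuple inside a
-- list of length >= 2 (line[0] is evaluated only then); B raises there too.
def Pre_cluster_parallel_lines_py (lines : List (List Int)) (tolerance : Int) : Prop :=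
  lines.length ≤ 1 ∨ ¬ ([] ∈ lines)
instance (lines : List (List Int)) (tolerance : Int) : Decidable (Pre_cluster_parallel_lines_py lines tolerance) := by unfold Pre_cluster_parallel_lines_py; infer_instance

def pvWitness_cluster_parallel_lines_py : List (List Int) × Int :=
  ([[3, 1], [1, 2], [20, 0], [7, 5]], 10)

def Spec_cluster_parallel_lines_py (lines : List (List Int)) (tolerance : Int) (out : List (List (List Int))) : Prop := out = cluster_parallel_lines_py_alt lines tolerance
instance (lines : List (List Int)) (tolerance : Int) (out : List (List (List Int))) : Decidable (Spec_cluster_parallel_lines_py lines tolerance out) := by unfold Spec_cluster_parallel_lines_py; infer_instance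

-- ===== CLAIM (what is proved, stated in full; the proofs are below) =====
def Claim_equal_cluster_parallel_lines_py : Prop := ∀ (lines : List (List Int)) (tolerance : Int), Dom_cluster_parallel_lines_py lines tolerance → Pre_cluster_parallel_lines_py lines tolerance → Spec_cluster_parallel_lines_py lines tolerance (cluster_parallel_lines_py lines tolerance)

-- ===== LEMMAS AND PROOFS =====

-- inner run: (maximal prefix of xs with each consecutive first-coordinate gap ≤ tolerance, rest)
def pvTakeRun (tolerance : Int) (prev : List Int) (xs : List (List Int)) :
    List (List Int) × List (List Int) :=
  match xs with
  | [] => ([], [])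
  | y :: ys =>
      if |pvFirst y - pvFirst prev| ≤ tolerance then
        let p := pvTakeRun tolerance y ys
        (y :: p.1, p.2)
      else ([], y :: ys)

theorem pvTakeRun_rest_le (tolerance : Int) (prev : List Int) (xs : List (List Int)) :
    (pvTakeRun tolerance prev xs).2.length ≤ xs.length := by
  induction xs generalizing prev with
  | nil => simp [pvTakeRun]
  | cons y ys ih =>
      simp only [pvTakeRun]
      split
      · exact le_trans (ih y) (Nat.le_succ _)
      · simp

-- the unfiltered run decomposition of a list
def pvChunks (tolerance : Int) (xs : List (List Int)) : List (List (List Int)) :=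
  match xs with
  | [] => []
  | x :: rest0 =>
      let p := pvTakeRun tolerance x rest0
      (x :: p.1) :: pvChunks tolerance p.2
termination_by xs.length
decreasing_by
  exact Nat.lt_succ_of_le (pvTakeRun_rest_le tolerance x rest0)

-- A's fold, read back in normal order, is the previously closed clusters followed by the
-- current cluster extended with its run and the chunks of the rest.
theorem pvFoldA_chunks (tolerance : Int) (xs : List (List Int)) :
    ∀ (l : List Int) (c : List (List Int)) (acc : List (List (List Int))),
      ((xs.foldl (pvStepA tolerance) ((l :: c) :: acc)).map List.reverse).reverse
        = (acc.map List.reverse).reverse ++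
            (((l :: c).reverse ++ (pvTakeRun tolerance l xs).1)
              :: pvChunks tolerance (pvTakeRun tolerance l xs).2) := by
  induction xs with
  | nil => intro l c acc; simp [pvTakeRun, pvChunks]
  | cons y ys ih =>
      intro l c acc
      simp only [List.foldl_cons, pvStepA, pvTakeRun]
      by_cases h : |pvFirst y - pvFirst l| ≤ tolerance
      · simp only [if_pos h, ih y (l :: c) acc]
        simp
      · simp only [if_neg h, ih y [] ((l :: c) :: acc)]
        simp [pvChunks]

-- B's labels in recursive form: label of the remaining lines given previous line and current lab
def pvLabCont (tolerance : Int) (prev : List Int) (lab : Int) (xs : List (List Int)) :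
    List Int :=
  match xs with
  | [] => []
  | y :: ys =>
      let lab' := if tolerance < |pvFirst y - pvFirst prev| then lab + 1 else lab
      lab' :: pvLabCont tolerance y lab' ys

-- labels of a list whose head starts a new cluster with label lab
def pvLabStart (tolerance : Int) (lab : Int) (xs : List (List Int)) : List Int :=
  match xs with
  | [] => []
  | x :: rest => lab :: pvLabCont tolerance x lab rest

theorem pvLabFold (tolerance : Int) (xs : List (List Int)) :
    ∀ (acc : List Int) (lab : Int) (p : List Int),
      (xs.foldl (pvLabStep tolerance) (acc, lab, some p)).1
        = acc ++ pvLabCont tolerance p lab xs := by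
  induction xs with
  | nil => intro acc lab p; simp [pvLabCont]
  | cons y ys ih =>
      intro acc lab p
      simp only [List.foldl_cons, pvLabStep, pvLabCont]
      split <;> simp [ih]

theorem pvLabCont_length (tolerance : Int) (xs : List (List Int)) :
    ∀ (prev : List Int) (lab : Int), (pvLabCont tolerance prev lab xs).length = xs.length := by
  induction xs with
  | nil => intro prev lab; rfl
  | cons y ys ih => intro prev lab; simp [pvLabCont, ih]

theorem pvLabStart_length (tolerance : Int) (lab : Int) (xs : List (List Int)) :
    (pvLabStart tolerance lab xs).length = xs.length := by
  cases xs with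
  | nil => rfl
  | cons x rest => simp [pvLabStart, pvLabCont_length]

theorem pvLabCont_ge (tolerance : Int) (xs : List (List Int)) :
    ∀ (prev : List Int) (lab : Int) (k : Int),
      k ∈ pvLabCont tolerance prev lab xs → lab ≤ k := by
  induction xs with
  | nil => intro prev lab k h; simp [pvLabCont] at h
  | cons y ys ih =>
      intro prev lab k h
      simp only [pvLabCont, List.mem_cons] at h
      rcases h with h | h
      · subst h; split <;> omega
      · have := ih y _ k h
        revert this; split <;> omega

theorem pvLabStart_ge (tolerance : Int) (lab : Int) (xs : List (List Int)) (k : Int)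
    (h : k ∈ pvLabStart tolerance lab xs) : lab ≤ k := by
  cases xs with
  | nil => simp [pvLabStart] at h
  | cons x rest =>
      simp only [pvLabStart, List.mem_cons] at h
      rcases h with h | h
      · omega
      · exact pvLabCont_ge tolerance rest x lab k h

-- the continuation labels decompose along the run
theorem pvLabCont_run (tolerance : Int) (xs : List (List Int)) :
    ∀ (prev : List Int) (lab : Int),
      pvLabCont tolerance prev lab xs
        = List.replicate (pvTakeRun tolerance prev xs).1.length lab
            ++ pvLabStart tolerance (lab + 1) (pvTakeRun tolerance prev xs).2 := by
  induction xs with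
  | nil => intro prev lab; simp [pvLabCont, pvTakeRun, pvLabStart]
  | cons y ys ih =>
      intro prev lab
      simp only [pvLabCont, pvTakeRun]
      by_cases h : |pvFirst y - pvFirst prev| ≤ tolerance
      · rw [if_neg (by omega), if_pos h]
        simp [ih y lab, List.replicate_succ]
      · rw [if_pos (by omega), if_neg h]
        simp [pvLabStart]

theorem pvZipReplicate {α : Type} (lab : Int) (ys : List α) :
    (List.replicate ys.length lab).zip ys = ys.map (fun y => (lab, y)) := by
  induction ys with
  | nil => rfl
  | cons y ys ih => simp [List.replicate_succ, ih]

theorem pvSetOfListReplicate (n : Nat) (lab : Int) :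
    PySem.Set.ofList (List.replicate (n + 1) lab) = [lab] := by
  induction n with
  | zero => rfl
  | succ m ih =>
      have : List.replicate (m + 1 + 1) lab = List.replicate (m + 1) lab ++ [lab] := by
        simp [List.replicate_succ']
      rw [this, PySem.Set.ofList_append, ih]
      simp [PySem.Set.update, PySem.Set.add, PySem.Set.contains]

theorem pvTakeRun_append (tolerance : Int) (xs : List (List Int)) :
    ∀ (prev : List Int),
      (pvTakeRun tolerance prev xs).1 ++ (pvTakeRun tolerance prev xs).2 = xs := by
  induction xs with
  | nil => intro prev; rfl
  | cons y ys ih =>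
      intro prev
      simp only [pvTakeRun]
      split
      · simp [ih y]
      · rfl

-- x :: rest0 splits as head ++ run ++ rest
theorem pvChunks_decomp (tolerance : Int) (x : List Int) (rest0 : List (List Int)) :
    x :: rest0 = (x :: (pvTakeRun tolerance x rest0).1) ++ (pvTakeRun tolerance x rest0).2 := by
  simp [pvTakeRun_append]

-- main: grouping the zipped (label, line) pairs by label, in first-occurrence label order,
-- is exactly the chunk decomposition
theorem pvGroup_chunks (tolerance : Int) (xs : List (List Int)) :
    ∀ (lab : Int),
      (PySem.Set.ofList (pvLabStart tolerance lab xs)).map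
        (fun k => (((pvLabStart tolerance lab xs).zip xs).filter
            (fun p => p.1 == k)).map (fun p => p.2))
        = pvChunks tolerance xs := by
  induction xs using pvChunks.induct tolerance with
  | case1 => intro lab; simp [pvLabStart, pvChunks, PySem.Set.ofList]
  | case2 x rest0 p ih =>
      intro lab
      have hdec : pvLabStart tolerance lab (x :: rest0)
          = List.replicate (p.1.length + 1) lab ++ pvLabStart tolerance (lab + 1) p.2 := by
        simp [pvLabStart, pvLabCont_run tolerance rest0 x lab, p, List.replicate_succ]
      have hset : PySem.Set.ofList (pvLabStart tolerance lab (x :: rest0))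
          = lab :: PySem.Set.ofList (pvLabStart tolerance (lab + 1) p.2) := by
        rw [hdec, PySem.Set.ofList_append, pvSetOfListReplicate,
            PySem.Set.update_eq_append_filter]
        have : ∀ y ∈ PySem.Set.ofList (pvLabStart tolerance (lab + 1) p.2),
            (!PySem.Set.contains [lab] y) = true := by
          intro y hy
          have hy' := (PySem.Set.mem_ofList _ y).mp hy
          have := pvLabStart_ge tolerance (lab + 1) p.2 y hy'
          simp [PySem.Set.contains]
          omega
        rw [List.filter_eq_self.mpr this]
        rfl
      have hzip : (pvLabStart tolerance lab (x :: rest0)).zip (x :: rest0)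
          = (lab, x) :: (p.1.map (fun y => (lab, y)))
              ++ (pvLabStart tolerance (lab + 1) p.2).zip p.2 := by
        rw [hdec]
        have hx : x :: rest0 = (x :: p.1) ++ p.2 := by
          have := pvChunks_decomp tolerance x rest0
          exact this
        rw [hx]
        rw [List.zip_append (by simp [List.replicate_succ])]
        simp [List.replicate_succ, pvZipReplicate]
      rw [hset, hzip, pvChunks]
      simp only [List.map_cons]
      congr 1
      · -- the bucket at key lab is the first chunk
        simp only [List.filter_append, List.filter_cons]
        have h1 : (p.1.map (fun y => (lab, y))).filter (fun q => q.1 == lab)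
            = p.1.map (fun y => (lab, y)) := by
          apply List.filter_eq_self.mpr
          intro q hq
          simp only [List.mem_map] at hq
          obtain ⟨y, _, rfl⟩ := hq
          simp
        have h2 : ((pvLabStart tolerance (lab + 1) p.2).zip p.2).filter
            (fun q => q.1 == lab) = [] := by
          apply List.filter_eq_nil_iff.mpr
          intro q hq
          obtain ⟨a, b⟩ := q
          have := pvLabStart_ge tolerance (lab + 1) p.2 a (List.of_mem_zip hq).1
          simp; omega
        simp only [h1, h2]
        simp
        rfl
      · -- the remaining buckets are the chunks of the rest
        rw [← ih (lab + 1)]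
        apply List.map_congr_left
        intro k hk
        have hk' := (PySem.Set.mem_ofList _ k).mp hk
        have hklab : lab + 1 ≤ k := pvLabStart_ge tolerance (lab + 1) p.2 k hk'
        simp only [List.filter_append, List.filter_cons]
        have h1 : (p.1.map (fun y => (lab, y))).filter (fun q => q.1 == k) = [] := by
          apply List.filter_eq_nil_iff.mpr
          intro q hq
          simp only [List.mem_map] at hq
          obtain ⟨y, _, rfl⟩ := hq
          simp; omega
        have h0 : ((lab, x).1 == k) = false := by simp; omega
        simp [h0, h1]

-- B's labels loop computes pvLabStart 0
theorem pvLabels_eq (tolerance : Int) (srt : List (List Int)) :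
    (srt.foldl (pvLabStep tolerance) ([], 0, none)).1 = pvLabStart tolerance 0 srt := by
  cases srt with
  | nil => rfl
  | cons x rest =>
      have h1 : pvLabStep tolerance ([], 0, none) x = ([0], 0, some x) := rfl
      rw [List.foldl_cons, h1, pvLabFold tolerance rest [0] 0 x]
      rfl

-- B equals the filtered chunks
theorem pvAlt_chunks (tolerance : Int) (lines : List (List Int)) :
    cluster_parallel_lines_py_alt lines tolerance
      = (pvChunks tolerance (PySem.List.sorted lines (fun x => x) false)).filter
          (fun cluster => 2 ≤ cluster.length) := by
  unfold cluster_parallel_lines_py_alt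
  simp only [pvLabels_eq]
  set srt := PySem.List.sorted lines (fun x => x) false with hsrt
  set labels := pvLabStart tolerance 0 srt with hlab
  set pairs := labels.zip srt with hpairs
  set buckets := pairs.foldl (fun d p => d.modify p.1 [] (fun x => x ++ [p.2]))
      PySem.Dict.empty with hbuckets
  have hlen : labels.length = srt.length := pvLabStart_length tolerance 0 srt
  have hnd : buckets.keys.Nodup := by
    apply PySem.Dict.nodup_keys_foldl_modify_key pairs (fun p => p.1) []
      (fun _ p => fun x => x ++ [p.2]) PySem.Dict.empty
    simp [PySem.Dict.keys_empty]
  have hkeys : buckets.keys = PySem.Set.ofList labels := by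
    have h := PySem.Dict.keys_foldl_modify_key pairs (fun p => p.1) []
      (fun _ p => fun x => x ++ [p.2]) PySem.Dict.empty
    have hfst : pairs.map (fun p => p.1) = labels := by
      rw [hpairs]
      exact List.map_fst_zip (le_of_eq hlen)
    rw [hfst] at h
    rw [← hbuckets] at h
    rw [h, PySem.Dict.keys_empty, PySem.Set.update_nil_left]
  have hgetD : ∀ k, buckets.getD k []
      = (pairs.filter (fun p => p.1 == k)).map (fun p => p.2) := by
    intro k
    have h := PySem.Dict.getD_foldl_modify_append pairs PySem.Dict.empty k
    rw [← hbuckets] at h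
    rw [h, PySem.Dict.getD_empty]
    rfl
  have hvals : buckets.values = pvChunks tolerance srt := by
    rw [PySem.Dict.values_eq_map_keys buckets hnd [], hkeys]
    have := pvGroup_chunks tolerance srt 0
    rw [← hlab, ← hpairs] at this
    rw [← this]
    apply List.map_congr_left
    intro k _
    exact hgetD k
  rw [hvals]

theorem cluster_parallel_lines_py_spec : Claim_equal_cluster_parallel_lines_py := by
  intro lines tolerance _hDom _hPre
  unfold Spec_cluster_parallel_lines_py
  rw [pvAlt_chunks]
  unfold cluster_parallel_lines_py
  by_cases h : lines = []
  · subst h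
    have hnil : PySem.List.sorted ([] : List (List Int)) (fun x => x) false = [] := rfl
    simp [hnil, pvChunks]
  · simp only [if_neg h]
    have hs : PySem.List.sorted lines (fun x => x) false ≠ [] := by
      intro hnil
      have := PySem.List.length_sorted (xs := lines) (key := fun x => x) (rev := false)
      rw [hnil] at this
      exact h (List.eq_nil_of_length_eq_zero this.symm)
    obtain ⟨x, xs, hx⟩ := List.exists_cons_of_ne_nil hs
    rw [hx]
    simp only [List.headI, List.drop_one, List.tail_cons]
    rw [pvFoldA_chunks tolerance xs x [] []]
    simp [pvChunks]
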